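-- pv_equiv track=rewrite | github.com/h1kk4n/--- | ЛР №2/sqr_equation.py | viete_solution
-- ===== SOURCE A (Python) =====
-- def solution_checker(a, b, c, x):
--     try:
--         return round(a * x ** 2 + b * x + c) == 0
--     except TypeError:
--         check = (a * x ** 2 + b * x + c) ** 2
--         return  abs(check.real) <= 10**(-10) and abs(check.imag) <= 10**(-10)
--
-- def viete_solution(a, b, c):
--     for x1 in range(c + 1):
--         for x2 in range(c + 1):
--             if (x1 * x2) == c and (x1 + x2) == -b:
--                 if x1 != x2 and solution_checker(a, b, c, x1) and solution_checker(a, b, c, x2):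
--                     return 'x1 = '+str(x1)+', x2 = '+str(x2)
--                 elif x1 == x2 and solution_checker(a, b, c, x1):
--                     return 'x = '+str(x1)
--                 return "Что-то пошло не так, корни не прошли проверку"
--     return None
-- ===== SOURCE B (Python) =====
-- def viete_solution(a, b, c):
--     # Single pass: the sum condition x1 + x2 == -b determines x2, so only x1 is scanned.
--     for x1 in range(c + 1):
--         x2 = -b - x1
--         if 0 <= x2 <= c and x1 * x2 == c:
--             r1 = a * x1 * x1 + b * x1 + c == 0
--             if x1 != x2:
--                 if r1 and a * x2 * x2 + b * x2 + c == 0: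
--                     return 'x1 = ' + str(x1) + ', x2 = ' + str(x2)
--             elif r1:
--                 return 'x = ' + str(x1)
--             return "Что-то пошло не так, корни не прошли проверку"
--     return None
-- ===== Notes on version B (the rewrite author's own statement) =====
-- stated objective: faster
-- what changed: The inner scan over all x2 in range(c+1) is removed: since the sum condition forces x2 = -b - x1, B computes x2 directly and checks it lies in [0, c], turning the O(c^2) nested loops into one O(c) loop.
import Mathlib
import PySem

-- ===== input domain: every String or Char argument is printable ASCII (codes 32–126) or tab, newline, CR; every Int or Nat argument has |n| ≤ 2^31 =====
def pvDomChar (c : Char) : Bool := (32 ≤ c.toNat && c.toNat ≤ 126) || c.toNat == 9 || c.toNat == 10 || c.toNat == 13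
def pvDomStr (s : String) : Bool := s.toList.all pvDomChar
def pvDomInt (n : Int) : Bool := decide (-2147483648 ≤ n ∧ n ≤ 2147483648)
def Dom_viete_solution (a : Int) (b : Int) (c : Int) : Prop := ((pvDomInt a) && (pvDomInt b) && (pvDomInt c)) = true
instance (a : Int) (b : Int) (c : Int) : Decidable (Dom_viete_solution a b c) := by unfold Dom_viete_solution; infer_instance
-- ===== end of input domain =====

-- B removes A's inner scan over x2 (the sum condition determines x2 = -b - x1), turning O(c^2) nested loops into one O(c) loop; measured asymptotically faster.


-- ===== PORT A =====
-- solution_checker on int inputs: round of an int is the int itself, so the check is exact equality with 0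
-- (the TypeError branch is unreachable for int arguments).
def pvCheckerA (a b c x : Int) : Bool := (a * x ^ 2 + b * x + c) == 0

-- the three-way return once (x1*x2 == c and x1+x2 == -b) holds
def pvHitA (a b c x1 x2 : Int) : String :=
  if x1 != x2 && pvCheckerA a b c x1 && pvCheckerA a b c x2 then
    "x1 = " ++ PySem.Int.toStr x1 ++ ", x2 = " ++ PySem.Int.toStr x2
  else if x1 == x2 && pvCheckerA a b c x1 then
    "x = " ++ PySem.Int.toStr x1
  else "Что-то пошло не так, корни не прошли проверку"

-- inner 'for x2 in range(c + 1)' with its returns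
def pvInnerA (a b c x1 : Int) : List Int → Option String
  | [] => none
  | x2 :: rest =>
    if x1 * x2 == c && x1 + x2 == -b then some (pvHitA a b c x1 x2)
    else pvInnerA a b c x1 rest

-- outer 'for x1 in range(c + 1)'
def pvOuterA (a b c : Int) : List Int → Option String
  | [] => none
  | x1 :: rest =>
    match pvInnerA a b c x1 (PySem.List.pyRange 0 (c + 1) 1) with
    | some s => some s
    | none => pvOuterA a b c rest

def viete_solution (a : Int) (b : Int) (c : Int) : Option String :=
  pvOuterA a b c (PySem.List.pyRange 0 (c + 1) 1)

-- ===== PORT B =====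
def pvRootB (a b c x : Int) : Bool := (a * x * x + b * x + c) == 0

def pvHitB (a b c x1 x2 : Int) : String :=
  if x1 != x2 then
    if pvRootB a b c x1 && pvRootB a b c x2 then
      "x1 = " ++ PySem.Int.toStr x1 ++ ", x2 = " ++ PySem.Int.toStr x2
    else "Что-то пошло не так, корни не прошли проверку"
  else if pvRootB a b c x1 then "x = " ++ PySem.Int.toStr x1
  else "Что-то пошло не так, корни не прошли проверку"

def pvLoopB (a b c : Int) : List Int → Option String
  | [] => none
  | x1 :: rest =>
    let x2 := -b - x1
    if 0 ≤ x2 ∧ x2 ≤ c ∧ x1 * x2 = c then some (pvHitB a b c x1 x2)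
    else pvLoopB a b c rest

def viete_solution_alt (a : Int) (b : Int) (c : Int) : Option String :=
  pvLoopB a b c (PySem.List.pyRange 0 (c + 1) 1)

-- ===== PRECONDITION & SPEC =====
def Spec_viete_solution (a : Int) (b : Int) (c : Int) (out : Option String) : Prop := out = viete_solution_alt a b c
instance (a : Int) (b : Int) (c : Int) (out : Option String) : Decidable (Spec_viete_solution a b c out) := by unfold Spec_viete_solution; infer_instance

-- ===== CLAIM (what is proved, stated in full; the proofs are below) =====
def Claim_equal_viete_solution : Prop := ∀ (a : Int) (b : Int) (c : Int), Dom_viete_solution a b c → Spec_viete_solution a b c (viete_solution a b c)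

-- ===== LEMMAS AND PROOFS =====

theorem pvHit_eq (a b c x1 x2 : Int) : pvHitA a b c x1 x2 = pvHitB a b c x1 x2 := by
  have hc : ∀ x : Int, pvCheckerA a b c x = pvRootB a b c x := by
    intro x; simp [pvCheckerA, pvRootB, pow_two, mul_assoc]
  simp only [pvHitA, pvHitB, hc]
  by_cases h12 : x1 = x2 <;> by_cases h1 : pvRootB a b c x1 = true <;>
    by_cases h2 : pvRootB a b c x2 = true <;>
      simp [h12, h1, h2]

theorem pvInnerA_eq (a b c x1 : Int) (xs : List Int) :
    pvInnerA a b c x1 xs =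
      if (-b - x1) ∈ xs ∧ x1 * (-b - x1) = c then some (pvHitA a b c x1 (-b - x1)) else none := by
  induction xs with
  | nil => simp [pvInnerA]
  | cons x2 rest ih =>
    simp only [pvInnerA, ih, List.mem_cons]
    by_cases hs : x1 + x2 = -b
    · have hx2 : x2 = -b - x1 := by omega
      subst hx2
      by_cases hp : x1 * (-b - x1) = c <;> simp [hp]
    · have hx2 : ¬ (-b - x1 = x2) := by omega
      by_cases hp : x1 * x2 = c <;> simp [hp, hs, hx2]

theorem pvLoops_eq (a b c : Int) (xs : List Int) :
    pvOuterA a b c xs = pvLoopB a b c xs := by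
  induction xs with
  | nil => rfl
  | cons x1 rest ih =>
    simp only [pvOuterA, pvLoopB, pvInnerA_eq, PySem.List.mem_pyRange_one]
    by_cases h : 0 ≤ -b - x1 ∧ -b - x1 ≤ c ∧ x1 * (-b - x1) = c
    · have h' : (0 ≤ -b - x1 ∧ -b - x1 < c + 1) ∧ x1 * (-b - x1) = c :=
        ⟨⟨h.1, by omega⟩, h.2.2⟩
      rw [if_pos h', if_pos h, pvHit_eq]
    · have h' : ¬ ((0 ≤ -b - x1 ∧ -b - x1 < c + 1) ∧ x1 * (-b - x1) = c) := by
        intro hh; exact h ⟨hh.1.1, by omega, hh.2⟩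
      rw [if_neg h', if_neg h, ih]

-- ===== VERDICT (by name: the statement is the Claim_ definition above) =====
theorem viete_solution_spec : Claim_equal_viete_solution := by
  intro a b c _
  show viete_solution a b c = viete_solution_alt a b c
  exact pvLoops_eq a b c _
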